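-- pv_equiv track=rewrite | github.com/maddymcook/data5500_spring2025 | week2_classes_objects/hw3/play_game.py | adjust_for_aces
-- ===== SOURCE A (Python) =====
-- def adjust_for_aces(score, ace_count):
--     while score > 21 and ace_count > 0:
--         score -= 10
--         ace_count -= 1
--     return score
--
--     while score > 21 and aces > 0:
--         score -= 10
--         aces -= 1
--
--     return score
-- ===== SOURCE B (Python) =====
-- def adjust_for_aces(score, ace_count):
--     # Spend the exact number of aces in closed form: each ace removes 10;
--     # ceil((score-21)/10) aces are needed, bounded by those available.
--     needed = (score - 12) // 10          # = ceil((score - 21) / 10)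
--     k = max(0, min(ace_count, needed))
--     return score - 10 * k
-- ===== Notes on version B (the rewrite author's own statement) =====
-- stated objective: faster
-- what changed: Replaces the while-loop that subtracts 10 per ace with a closed-form computation of how many aces to spend (k = max(0, min(ace_count, ceil((score-21)/10)))), returning score - 10*k.
import Mathlib
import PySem

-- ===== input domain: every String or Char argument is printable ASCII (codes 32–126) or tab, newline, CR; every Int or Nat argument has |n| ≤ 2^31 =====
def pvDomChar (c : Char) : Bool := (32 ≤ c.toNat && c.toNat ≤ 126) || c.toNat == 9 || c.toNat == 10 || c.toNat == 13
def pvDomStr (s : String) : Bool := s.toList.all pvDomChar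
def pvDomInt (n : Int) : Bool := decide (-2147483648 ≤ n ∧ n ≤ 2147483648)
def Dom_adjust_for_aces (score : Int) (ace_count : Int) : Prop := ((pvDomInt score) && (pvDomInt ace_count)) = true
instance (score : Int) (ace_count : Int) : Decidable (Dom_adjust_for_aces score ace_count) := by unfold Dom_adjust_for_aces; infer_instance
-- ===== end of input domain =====

-- B replaces A's while-loop over aces with a closed-form count of aces to spend (faster: O(1) vs O(ace_count)).


-- ===== PORT A =====
-- while score > 21 and ace_count > 0: score -= 10; ace_count -= 1
def adjust_for_aces (score : Int) (ace_count : Int) : Int :=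
  if score > 21 ∧ ace_count > 0 then adjust_for_aces (score - 10) (ace_count - 1)
  else score
termination_by ace_count.toNat
decreasing_by omega

-- ===== PORT B =====
def adjust_for_aces_alt (score : Int) (ace_count : Int) : Int :=
  let needed := PySem.Int.floordiv (score - 12) 10
  let k := max 0 (min ace_count needed)
  score - 10 * k

-- ===== PRECONDITION & SPEC =====
def Spec_adjust_for_aces (score : Int) (ace_count : Int) (out : Int) : Prop := out = adjust_for_aces_alt score ace_count
instance (score : Int) (ace_count : Int) (out : Int) : Decidable (Spec_adjust_for_aces score ace_count out) := by unfold Spec_adjust_for_aces; infer_instance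

-- ===== CLAIM (what is proved, stated in full; the proofs are below) =====
def Claim_equal_adjust_for_aces : Prop := ∀ (score : Int) (ace_count : Int), Dom_adjust_for_aces score ace_count → Spec_adjust_for_aces score ace_count (adjust_for_aces score ace_count)

-- ===== LEMMAS AND PROOFS =====
theorem adjust_for_aces_closed (n : Nat) (score ace_count : Int) (h : ace_count.toNat = n) :
    adjust_for_aces score ace_count = adjust_for_aces_alt score ace_count := by
  induction n generalizing score ace_count with
  | zero =>
    rw [adjust_for_aces]
    have hq := PySem.Int.floordiv_eq_ediv_of_pos (a := score - 12) (b := 10) (by omega)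
    simp only [adjust_for_aces_alt, hq]
    have := Int.emod_emod_of_dvd (score - 12) (dvd_refl 10)
    have h1 : 10 * ((score - 12) / 10) + (score - 12) % 10 = score - 12 := by omega
    split <;> omega
  | succ m ih =>
    rw [adjust_for_aces]
    split
    · rename_i hc
      rw [ih (score - 10) (ace_count - 1) (by omega)]
      have hq := PySem.Int.floordiv_eq_ediv_of_pos (a := score - 12) (b := 10) (by omega)
      have hq' := PySem.Int.floordiv_eq_ediv_of_pos (a := score - 10 - 12) (b := 10) (by omega)
      simp only [adjust_for_aces_alt, hq, hq']
      have h1 : 10 * ((score - 12) / 10) + (score - 12) % 10 = score - 12 := by omega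
      have h2 : 10 * ((score - 22) / 10) + (score - 22) % 10 = score - 22 := by omega
      have h3 : (score - 22) % 10 = (score - 12) % 10 := by omega
      omega
    · rename_i hc
      have hq := PySem.Int.floordiv_eq_ediv_of_pos (a := score - 12) (b := 10) (by omega)
      simp only [adjust_for_aces_alt, hq]
      have h1 : 10 * ((score - 12) / 10) + (score - 12) % 10 = score - 12 := by omega
      omega

-- ===== VERDICT (by name: the statement is the Claim_ definition above) =====
theorem adjust_for_aces_spec : Claim_equal_adjust_for_aces := by
  intro score ace_count _
  exact adjust_for_aces_closed ace_count.toNat score ace_count rfl
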